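-- pv_equiv track=rewrite | github.com/HunterKruger/NLP_Layzee | nl2sql/m_sql/trained_model/model/sql_utils/utils_tableqa.py | extract_val
-- ===== SOURCE A (Python) =====
-- def extract_val(pr_tags, l_n):
--     value_indexes = []
--     value_nums = []
--     for b, tags in enumerate(pr_tags):
--         vi = []
--         num = 0
--         start = -1
--         for i in range(l_n[b]):
--             t = tags[i]
--             if t == 1:
--                 if start < 0:
--                     start = i
--             else:
--                 if start >= 0:
--                     vi.append((start, i - 1))
--                     num += 1
--                     start = -1
--         if start >= 0:
--             vi.append((start, l_n[b] - 1))
--             num += 1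
--         if not vi and num == 0:
--             vi = [[0, 0]]
--             num += 1
--         value_indexes.append(vi)
--         value_nums.append(num)
--     return value_indexes, value_nums
-- ===== SOURCE B (Python) =====
-- def extract_val(pr_tags, l_n):
--     value_indexes = []
--     value_nums = []
--     for b, tags in enumerate(pr_tags):
--         n = l_n[b]
--         xs = [tags[i] for i in range(n)]
--         vi = []
--         pos = 0
--         while pos < n:
--             end = pos
--             while end < n and xs[end] == xs[pos]:
--                 end += 1
--             if xs[pos] == 1:
--                 vi.append((pos, end - 1))
--             pos = end
--         if not vi:
--             vi = [[0, 0]]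
--         value_indexes.append(vi)
--         value_nums.append(len(vi))
--     return value_indexes, value_nums
-- ===== Notes on version B (the rewrite author's own statement) =====
-- stated objective: alternative
-- what changed: B replaces A's stateful start-flag scan with a run-decomposition: it materialises the first l_n[b] tags and walks maximal runs of equal values with two index pointers, emitting one span per run of 1s, and derives the count as len(vi) instead of a separate counter.
import Mathlib
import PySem

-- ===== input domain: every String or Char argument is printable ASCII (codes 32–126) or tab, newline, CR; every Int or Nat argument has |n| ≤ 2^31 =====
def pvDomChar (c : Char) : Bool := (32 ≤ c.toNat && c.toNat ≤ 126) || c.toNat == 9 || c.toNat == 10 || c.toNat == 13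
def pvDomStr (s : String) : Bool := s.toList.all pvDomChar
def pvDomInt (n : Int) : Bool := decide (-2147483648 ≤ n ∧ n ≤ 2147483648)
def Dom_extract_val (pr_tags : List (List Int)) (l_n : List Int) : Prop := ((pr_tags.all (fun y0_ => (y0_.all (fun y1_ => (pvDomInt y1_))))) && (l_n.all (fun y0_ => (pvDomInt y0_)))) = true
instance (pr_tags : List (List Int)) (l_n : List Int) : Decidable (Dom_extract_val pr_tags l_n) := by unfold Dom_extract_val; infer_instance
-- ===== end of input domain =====

-- B extracts the spans by walking maximal runs of equal tags (two pointers) instead of A's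
-- start-flag state machine; same cost, a different decomposition (objective: alternative).

-- ===== PORT A =====
-- one step of A's inner loop; state = (vi, num, start)
def aStep (s : List (Int × Int) × Int × Int) (i t : Int) : List (Int × Int) × Int × Int :=
  if t = 1 then
    (if s.2.2 < 0 then (s.1, s.2.1, i) else s)
  else
    (if s.2.2 ≥ 0 then (s.1 ++ [(s.2.2, i - 1)], s.2.1 + 1, -1) else s)

-- A's trailing `if start >= 0` fix-up after the loop
def finA (s : List (Int × Int) × Int × Int) (e : Int) : List (Int × Int) × Int :=
  if s.2.2 ≥ 0 then (s.1 ++ [(s.2.2, e - 1)], s.2.1 + 1) else (s.1, s.2.1)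

-- A's body for one row (the `for i in range(l_n[b])` loop plus the trailing fix-ups)
def aRow (tags : List Int) (n : Int) : List (Int × Int) × Int :=
  let s := (PySem.List.pyRange 0 n 1).foldl
      (fun s i => aStep s i (PySem.List.pyGetD tags i 0)) ([], 0, -1)
  let r := finA s n
  if r.1 = [] ∧ r.2 = 0 then ([((0 : Int), (0 : Int))], r.2 + 1) else r

def extract_val (pr_tags : List (List Int)) (l_n : List Int) :
    (List (List (Int × Int))) × List Int :=
  (PySem.List.enumerate pr_tags 0).foldl
    (fun acc bt =>
      let r := aRow bt.2 (PySem.List.pyGetD l_n bt.1 0)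
      (acc.1 ++ [r.1], acc.2 ++ [r.2]))
    ([], [])

-- ===== PORT B =====
-- B's run walk: the outer `while pos < n` / inner `while end < n and xs[end] == xs[pos]`
-- pair, transcribed structurally (the inner while is takeWhile/dropWhile on the rest).
def bRuns : List Int → Int → List (Int × Int)
  | [], _ => []
  | x :: rest, pos =>
    let run := rest.takeWhile (fun y => y == x)
    let tail := rest.dropWhile (fun y => y == x)
    let c : Int := 1 + run.length
    (if x = 1 then [(pos, pos + c - 1)] else []) ++ bRuns tail (pos + c)
termination_by xs => xs.length
decreasing_by
  have := List.length_dropWhile_le (fun y => y == x) rest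
  simp at *; omega

def bRow (tags : List Int) (n : Int) : List (Int × Int) × Int :=
  let xs := (PySem.List.pyRange 0 n 1).map (fun i => PySem.List.pyGetD tags i 0)
  let vi := bRuns xs 0
  let vi := if vi = [] then [((0 : Int), (0 : Int))] else vi
  (vi, (vi.length : Int))

def extract_val_alt (pr_tags : List (List Int)) (l_n : List Int) :
    (List (List (Int × Int))) × List Int :=
  (PySem.List.enumerate pr_tags 0).foldl
    (fun acc bt =>
      let r := bRow bt.2 (PySem.List.pyGetD l_n bt.1 0)
      (acc.1 ++ [r.1], acc.2 ++ [r.2]))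
    ([], [])

-- ===== PRECONDITION & SPEC =====
-- Pre_ excludes exactly the inputs on which Python A raises IndexError:
-- l_n shorter than pr_tags, or l_n[b] exceeding the length of row b.
def Pre_extract_val (pr_tags : List (List Int)) (l_n : List Int) : Prop :=
  pr_tags.length ≤ l_n.length ∧
    ∀ b ∈ List.range pr_tags.length, l_n.getD b 0 ≤ ((pr_tags.getD b []).length : Int)
instance (pr_tags : List (List Int)) (l_n : List Int) : Decidable (Pre_extract_val pr_tags l_n) := by
  unfold Pre_extract_val; infer_instance

def pvWitness_extract_val : List (List Int) × List Int := ([[1, 0, 1], [0, 0]], [3, 1])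

def Spec_extract_val (pr_tags : List (List Int)) (l_n : List Int) (out : (List (List (Int × Int))) × List Int) : Prop := out = extract_val_alt pr_tags l_n
instance (pr_tags : List (List Int)) (l_n : List Int) (out : (List (List (Int × Int))) × List Int) : Decidable (Spec_extract_val pr_tags l_n out) := by unfold Spec_extract_val; infer_instance

-- ===== CLAIM (what is proved, stated in full; the proofs are below) =====
def Claim_equal_extract_val : Prop := ∀ (pr_tags : List (List Int)) (l_n : List Int), Dom_extract_val pr_tags l_n → Pre_extract_val pr_tags l_n → Spec_extract_val pr_tags l_n (extract_val pr_tags l_n)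

-- ===== LEMMAS AND PROOFS =====

-- A's inner loop as a structural recursion over the (position, tag) stream
def foldAe : List Int → Int → (List (Int × Int) × Int × Int) → (List (Int × Int) × Int × Int)
  | [], _, s => s
  | t :: ts, p, s => foldAe ts (p + 1) (aStep s p t)

theorem foldl_eq_foldAe (g : Int → Int) :
    ∀ (k : Nat) (a n : Int), (n - a).toNat = k → ∀ s,
      (PySem.List.pyRange a n 1).foldl (fun s i => aStep s i (g i)) s
        = foldAe ((PySem.List.pyRange a n 1).map g) a s := by
  intro k
  induction k with
  | zero =>
    intro a n hk s
    rw [PySem.List.pyRange_one_eq_nil (by omega)]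
    simp [foldAe]
  | succ k ih =>
    intro a n hk s
    rw [PySem.List.pyRange_one_cons (by omega)]
    simp only [List.foldl_cons, List.map_cons, foldAe]
    exact ih (a + 1) n (by omega) _

theorem foldAe_append :
    ∀ (xs ys : List Int) (p : Int) s,
      foldAe (xs ++ ys) p s = foldAe ys (p + xs.length) (foldAe xs p s) := by
  intro xs
  induction xs with
  | nil => intro ys p s; simp [foldAe]
  | cons x xt ih =>
    intro ys p s
    simp only [List.cons_append, foldAe, ih]
    congr 1
    simp only [List.length_cons]
    push_cast
    ring

theorem foldAe_non1 (acc : List (Int × Int)) (num : Int) :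
    ∀ (ys : List Int), (∀ y ∈ ys, y ≠ 1) → ∀ (p : Int),
      foldAe ys p (acc, num, -1) = (acc, num, -1) := by
  intro ys
  induction ys with
  | nil => intro _ p; rfl
  | cons y yt ih =>
    intro h p
    have hy : y ≠ 1 := h y (by simp)
    simp only [foldAe, aStep, if_neg hy]
    rw [if_neg (by norm_num)]
    exact ih (fun z hz => h z (by simp [hz])) (p + 1)

theorem foldAe_ones_keep (acc : List (Int × Int)) (num q : Int) (hq : 0 ≤ q) :
    ∀ (ys : List Int), (∀ y ∈ ys, y = 1) → ∀ (p : Int),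
      foldAe ys p (acc, num, q) = (acc, num, q) := by
  intro ys
  induction ys with
  | nil => intro _ p; rfl
  | cons y yt ih =>
    intro h p
    have hy : y = 1 := h y (by simp)
    simp only [foldAe, aStep, if_pos hy]
    rw [if_neg (by omega)]
    exact ih (fun z hz => h z (by simp [hz])) (p + 1)

theorem main_runs :
    ∀ (k : Nat) (xs : List Int), xs.length ≤ k → ∀ (p : Int), 0 ≤ p →
      ∀ (acc : List (Int × Int)) (num : Int),
        finA (foldAe xs p (acc, num, -1)) (p + xs.length)
          = (acc ++ bRuns xs p, num + ((bRuns xs p).length : Int)) := by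
  intro k
  induction k with
  | zero =>
    intro xs hlen p hp acc num
    have : xs = [] := List.length_eq_zero_iff.mp (by omega)
    subst this
    simp [foldAe, finA, bRuns]
  | succ k ih =>
    intro xs hlen p hp acc num
    match xs with
    | [] => simp [foldAe, finA, bRuns]
    | x :: rest =>
      obtain ⟨run, tail, hrun_def, htail_def⟩ :
          ∃ run tail, run = rest.takeWhile (fun y => y == x) ∧
            tail = rest.dropWhile (fun y => y == x) := ⟨_, _, rfl, rfl⟩
      have hsplit : run ++ tail = rest := by
        rw [hrun_def, htail_def]; exact List.takeWhile_append_dropWhile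
      have hrun : ∀ y ∈ run, y = x := by
        intro y hy
        rw [hrun_def] at hy
        simpa using List.mem_takeWhile_imp hy
      have hB : bRuns (x :: rest) p
          = (if x = 1 then [(p, p + (1 + (run.length : Int)) - 1)] else [])
              ++ bRuns tail (p + (1 + (run.length : Int))) := by
        rw [bRuns, ← hrun_def, ← htail_def]
      have hlen_rest : rest.length = run.length + tail.length := by
        rw [← hsplit]; simp
      have htail_len : tail.length ≤ k := by
        simp only [List.length_cons] at hlen; omega
      have hxsplit : (x :: rest : List Int) = (x :: run) ++ tail := by
        simp [hsplit]
      rw [hB, hxsplit, foldAe_append]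
      have he : p + (((x :: run) ++ tail : List Int).length : Int)
          = (p + 1 + (run.length : Int)) + (tail.length : Int) := by
        simp only [List.length_append, List.length_cons]; push_cast; ring
      have hpos : p + (((x :: run) : List Int).length : Int) = p + 1 + (run.length : Int) := by
        simp only [List.length_cons]; push_cast; ring
      rw [he, hpos]
      by_cases hx : x = 1
      · subst hx
        have hfold1 : foldAe ((1 : Int) :: run) p (acc, num, -1) = (acc, num, p) := by
          simp only [foldAe, aStep]
          rw [if_pos (by norm_num)]
          exact foldAe_ones_keep acc num p hp run hrun (p + 1)
        rw [hfold1, if_pos rfl]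
        rcases tail with _ | ⟨y, ys⟩
        · -- the run of 1s reaches the end of the row
          simp only [foldAe, bRuns, List.length_nil, List.append_nil, List.length_cons]
          rw [finA, if_pos (by simpa using hp)]
          simp only [Prod.mk.injEq]
          refine ⟨?_, ?_⟩
          · push_cast
            congr 3
            ring
          · push_cast; ring
        · -- the run of 1s is closed by the first element of tail
          have hy1 : y ≠ 1 := by
            have h := List.head?_dropWhile_not (fun z => z == (1 : Int)) rest
            rw [← htail_def] at h
            simpa using h
          have hstep : foldAe (y :: ys) (p + 1 + (run.length : Int)) (acc, num, p)
              = foldAe (y :: ys) (p + 1 + (run.length : Int))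
                  (acc ++ [(p, p + (1 + (run.length : Int)) - 1)], num + 1, -1) := by
            conv_lhs => rw [foldAe]
            conv_rhs => rw [foldAe]
            simp only [aStep, if_neg hy1]
            rw [if_pos (by omega), if_neg (by norm_num)]
            congr 3
            ring_nf
          rw [hstep]
          have hih := ih (y :: ys) (by simpa using htail_len) (p + 1 + (run.length : Int))
            (by omega) (acc ++ [(p, p + (1 + (run.length : Int)) - 1)]) (num + 1)
          rw [show (p + 1 + (run.length : Int)) + ((y :: ys : List Int).length : Int)
              = p + 1 + (run.length : Int) + ((y :: ys : List Int).length : Int) by ring]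
          rw [hih]
          rw [show p + (1 + (run.length : Int)) = p + 1 + (run.length : Int) by ring]
          simp only [Prod.mk.injEq]
          refine ⟨?_, ?_⟩
          · simp [List.append_assoc]
          · simp only [List.length_append, List.length_cons, List.length_nil]
            push_cast; ring
      · -- a run of non-1 tags contributes nothing
        have hnon1 : ∀ y ∈ x :: run, y ≠ 1 := by
          intro y hy
          rcases List.mem_cons.mp hy with h | h
          · rw [h]; exact hx
          · rw [hrun y h]; exact hx
        rw [foldAe_non1 acc num (x :: run) hnon1 p, if_neg hx]
        have hih := ih tail htail_len (p + 1 + (run.length : Int)) (by omega) acc num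
        rw [hih]
        rw [show p + (1 + (run.length : Int)) = p + 1 + (run.length : Int) by ring]
        simp

theorem row_eq (tags : List Int) (n : Int) : aRow tags n = bRow tags n := by
  unfold aRow bRow
  dsimp only
  have hb := foldl_eq_foldAe (fun i => PySem.List.pyGetD tags i 0) (n - 0).toNat 0 n rfl
    (([], 0, -1) : List (Int × Int) × Int × Int)
  simp only [] at hb
  rw [hb]
  by_cases hn : 0 < n
  · have hlen : (((PySem.List.pyRange 0 n 1).map
        (fun i => PySem.List.pyGetD tags i 0)).length : Int) = n := by
      simp [PySem.List.length_pyRange_one]; omega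
    have hmain := main_runs ((PySem.List.pyRange 0 n 1).map
        (fun i => PySem.List.pyGetD tags i 0)).length _ le_rfl 0 le_rfl [] 0
    rw [show (0 : Int) + (((PySem.List.pyRange 0 n 1).map
        (fun i => PySem.List.pyGetD tags i 0)).length : Int) = n by omega] at hmain
    rw [hmain]
    set vi := bRuns ((PySem.List.pyRange 0 n 1).map (fun i => PySem.List.pyGetD tags i 0)) 0
      with hvi
    by_cases hv : vi = []
    · simp [hv]
    · have : vi.length ≠ 0 := by simpa [List.length_eq_zero_iff] using hv
      rw [if_neg (by simp [hv]), if_neg hv]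
      simp
  · rw [PySem.List.pyRange_one_eq_nil (by omega)]
    simp [foldAe, finA, bRuns]

-- ===== VERDICT (by name: the statement is the Claim_ definition above) =====
theorem extract_val_spec : Claim_equal_extract_val := by
  intro pr_tags l_n _ _
  unfold Spec_extract_val extract_val extract_val_alt
  have hfun : (fun (acc : (List (List (Int × Int))) × List Int) (bt : Int × List Int) =>
      let r := aRow bt.2 (PySem.List.pyGetD l_n bt.1 0)
      (acc.1 ++ [r.1], acc.2 ++ [r.2]))
      = (fun acc bt =>
      let r := bRow bt.2 (PySem.List.pyGetD l_n bt.1 0)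
      (acc.1 ++ [r.1], acc.2 ++ [r.2])) := by
    funext acc bt
    simp only [row_eq]
  rw [hfun]
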